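-- pv_equiv track=rewrite | github.com/cynic64/neovim-openrouter | rplugin/python3/llm_response.py | parse_buffer_content
-- ===== SOURCE A (Python) =====
-- def parse_buffer_content(lines):
--     messages = []
--     message_content = []
--     role = 'user'  # Assume conversation starts with user
--     idx = 0
--     model = None
--     # Check for 'MODEL: <model_name>' at the top
--     if lines and lines[0].startswith('MODEL: '):
--         model = lines[0][len('MODEL: '):].strip()
--         idx = 1  # Skip the model line
--         # Skip the empty line after the model line if present
--         if idx < len(lines) and lines[idx].strip() == '':
--             idx += 1
--
--     while idx < len(lines):
--         line = lines[idx]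
--         if line.strip() == '---':
--             # Message separator found
--             # Append the current message
--             if message_content:
--                 content = '\n'.join(message_content).strip()
--                 if content:
--                     messages.append({'role': role, 'content': content})
--             # Switch role
--             role = 'assistant' if role == 'user' else 'user'
--             message_content = []
--             # Skip the empty line after '---' if present
--             idx += 1
--             if idx < len(lines) and lines[idx].strip() == '':
--                 idx += 1
--             continue
--         else:
--             message_content.append(line)
--             idx += 1
--     # Append the last message
--     if message_content:
--         content = '\n'.join(message_content).strip()
--         if content:
--             messages.append({'role': role, 'content': content})
--     return model, messages
-- ===== SOURCE B (Python) =====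
-- def parse_buffer_content(lines):
--     model = None
--     rest = lines
--     if lines and lines[0].startswith('MODEL: '):
--         model = lines[0][len('MODEL: '):].strip()
--         rest = lines[1:]
--     segments = []
--     cur = []
--     for line in rest:
--         if line.strip() == '---':
--             segments.append(cur)
--             cur = []
--         else:
--             cur.append(line)
--     segments.append(cur)
--     messages = []
--     for i, seg in enumerate(segments):
--         content = '\n'.join(seg).strip()
--         if content:
--             messages.append({'role': 'user' if i % 2 == 0 else 'assistant',
--                              'content': content})
--     return model, messages
-- ===== Notes on version B (the rewrite author's own statement) =====
-- stated objective: simpler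
-- what changed: Replaces A's index-walking while loop with mutable role/content state and blank-line skipping by a two-phase decomposition: split the lines into segments at '---' separators, then map segment index parity to the role, joining and stripping each segment once.
import Mathlib
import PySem

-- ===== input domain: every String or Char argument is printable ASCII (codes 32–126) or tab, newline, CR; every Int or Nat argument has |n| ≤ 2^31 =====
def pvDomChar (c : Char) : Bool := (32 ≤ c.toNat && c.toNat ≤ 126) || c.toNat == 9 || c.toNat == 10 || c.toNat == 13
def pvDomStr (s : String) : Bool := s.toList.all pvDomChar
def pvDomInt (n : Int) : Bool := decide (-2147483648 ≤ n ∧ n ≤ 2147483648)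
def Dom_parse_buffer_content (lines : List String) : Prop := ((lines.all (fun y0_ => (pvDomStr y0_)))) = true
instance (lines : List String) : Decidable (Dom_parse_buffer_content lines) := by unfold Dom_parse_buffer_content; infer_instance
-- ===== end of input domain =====

-- B re-decomposes A's index-walking while loop as split-at-'---' segments with parity-indexed
-- roles (objective: simpler); return values proved equal on all inputs.

-- ===== PORT A =====
-- 'if message_content: content = "\n".join(...).strip(); if content: messages.append(...)'
def pvA_flush (role : String) (mc : List String) (msgs : List (List (String × String))) :
    List (List (String × String)) :=
  if mc = [] then msgs
  else
    let content := PySem.Str.strip (PySem.Str.join "\n" mc)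
    if content = "" then msgs
    else msgs ++ [[("role", role), ("content", content)]]

-- the 'while idx < len(lines)' loop, walking the suffix lines[idx:]
def pvA_loop : List String → String → List String → List (List (String × String)) →
    List (List (String × String))
  | [], role, mc, msgs => pvA_flush role mc msgs
  | line :: rest, role, mc, msgs =>
    if PySem.Str.strip line = "---" then
      let msgs' := pvA_flush role mc msgs
      let role' := if role = "user" then "assistant" else "user"
      match rest with
      | r :: rest' =>
        if PySem.Str.strip r = "" then pvA_loop rest' role' [] msgs'
        else pvA_loop (r :: rest') role' [] msgs'
      | [] => pvA_loop [] role' [] msgs'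
    else pvA_loop rest role (mc ++ [line]) msgs
  termination_by rest _ _ _ => rest.length
  decreasing_by all_goals simp

def parse_buffer_content (lines : List String) : Option String × (List (List (String × String))) :=
  match lines with
  | [] => (none, pvA_loop [] "user" [] [])
  | l0 :: rest0 =>
    if PySem.Str.startswith l0 "MODEL: " then
      let model := some (PySem.Str.strip (PySem.Str.slice l0 (some 7) none))
      match rest0 with
      | r :: rest1 =>
        if PySem.Str.strip r = "" then (model, pvA_loop rest1 "user" [] [])
        else (model, pvA_loop (r :: rest1) "user" [] [])
      | [] => (model, pvA_loop [] "user" [] [])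
    else (none, pvA_loop lines "user" [] [])

-- ===== PORT B =====
-- 'for line in rest: …' building (segments, cur); then segments.append(cur)
def pvB_segments (rest : List String) : List (List String) :=
  let p := rest.foldl
    (fun (acc : List (List String) × List String) line =>
      if PySem.Str.strip line = "---" then (acc.1 ++ [acc.2], [])
      else (acc.1, acc.2 ++ [line]))
    ([], [])
  p.1 ++ [p.2]

-- 'for i, seg in enumerate(segments): …'
def pvB_messages (segs : List (List String)) : List (List (String × String)) :=
  (PySem.List.enumerate segs).foldl
    (fun msgs iseg =>
      let content := PySem.Str.strip (PySem.Str.join "\n" iseg.2)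
      if content = "" then msgs
      else msgs ++
        [[("role", if PySem.Int.mod iseg.1 2 == 0 then "user" else "assistant"),
          ("content", content)]])
    []

def parse_buffer_content_alt (lines : List String) : Option String × (List (List (String × String))) :=
  match lines with
  | [] => (none, pvB_messages (pvB_segments []))
  | l0 :: rest0 =>
    if PySem.Str.startswith l0 "MODEL: " then
      (some (PySem.Str.strip (PySem.Str.slice l0 (some 7) none)),
       pvB_messages (pvB_segments rest0))
    else (none, pvB_messages (pvB_segments lines))

-- ===== PRECONDITION & SPEC =====
def Spec_parse_buffer_content (lines : List String) (out : Option String × (List (List (String × String)))) : Prop := out = parse_buffer_content_alt lines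
instance (lines : List String) (out : Option String × (List (List (String × String)))) : Decidable (Spec_parse_buffer_content lines out) := by unfold Spec_parse_buffer_content; infer_instance

-- ===== CLAIM (what is proved, stated in full; the proofs are below) =====
def Claim_equal_parse_buffer_content : Prop := ∀ (lines : List String), Dom_parse_buffer_content lines → Spec_parse_buffer_content lines (parse_buffer_content lines)

-- ===== LEMMAS AND PROOFS =====

-- (first segment, remaining segments) of a line list, cutting at lines stripping to '---'
def pvSegs : List String → List String × List (List String)
  | [] => ([], [])
  | l :: rest =>
    let p := pvSegs rest
    if PySem.Str.strip l = "---" then ([], p.1 :: p.2)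
    else (l :: p.1, p.2)

def pvContent (seg : List String) : String := PySem.Str.strip (PySem.Str.join "\n" seg)

def pvToggle (role : String) : String := if role = "user" then "assistant" else "user"

-- alternating-role message list of a segment list
def pvMsgs (role : String) : List (List String) → List (List (String × String))
  | [] => []
  | s :: ss =>
    (if pvContent s = "" then [] else [[("role", role), ("content", pvContent s)]]) ++
      pvMsgs (pvToggle role) ss

lemma pvA_flush_eq (role : String) (mc : List String) (msgs : List (List (String × String))) :
    pvA_flush role mc msgs =
      msgs ++ (if pvContent mc = "" then [] else [[("role", role), ("content", pvContent mc)]]) := by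
  rcases mc with _ | ⟨l, t⟩
  · simp [pvA_flush, pvContent]
    decide
  · simp only [pvA_flush, pvContent, if_neg (List.cons_ne_nil l t)]
    split_ifs <;> simp

lemma strip_eq_empty_iff (s : String) :
    PySem.Str.strip s = "" ↔ ∀ c ∈ s.toList, PySem.Chars.isspace c = true := by
  constructor
  · intro h
    have h' : PySem.Chars.strip s.toList = [] := by
      have := congrArg String.toList h
      simpa [PySem.Str.strip] using this
    simp only [PySem.Chars.strip, PySem.Chars.rstrip, PySem.Chars.lstrip] at h'
    have h2 : ∀ c ∈ (List.dropWhile PySem.Chars.isspace s.toList).reverse,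
        PySem.Chars.isspace c = true := by
      rw [← List.dropWhile_eq_nil_iff]
      simpa using h'
    intro c hc
    have hc2 : c ∈ List.takeWhile PySem.Chars.isspace s.toList ++
        List.dropWhile PySem.Chars.isspace s.toList := by
      rw [List.takeWhile_append_dropWhile]; exact hc
    rcases List.mem_append.mp hc2 with h3 | h3
    · exact List.mem_takeWhile_imp h3
    · exact h2 c (List.mem_reverse.mpr h3)
  · intro h
    have : PySem.Chars.lstrip s.toList = [] := by
      simp only [PySem.Chars.lstrip]
      rw [List.dropWhile_eq_nil_iff]; exact h
    simp [PySem.Str.strip, PySem.Chars.strip, this, PySem.Chars.rstrip]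

lemma strip_ws_prefix (w cs : List Char) (h : ∀ c ∈ w, PySem.Chars.isspace c = true) :
    PySem.Chars.strip (w ++ cs) = PySem.Chars.strip cs := by
  simp only [PySem.Chars.strip, PySem.Chars.lstrip]
  rw [List.dropWhile_append]
  simp [List.dropWhile_eq_nil_iff.mpr h]

-- the key fact: a whitespace-only first line disappears under the final strip of the joined content
lemma pvContent_blank_cons (r : String) (hr : PySem.Str.strip r = "") (s : List String) :
    pvContent (r :: s) = pvContent s := by
  have hw := (strip_eq_empty_iff r).mp hr
  have hrl : PySem.Chars.strip r.toList = [] := by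
    have := congrArg String.toList hr
    simpa [PySem.Str.strip] using this
  have hnl : ∀ c ∈ ("\n".toList), PySem.Chars.isspace c = true := by
    intro c hc
    have : c = '\n' := by simpa using hc
    subst this; decide
  have key : PySem.Chars.strip ((PySem.Str.join "\n" (r :: s)).toList)
      = PySem.Chars.strip ((PySem.Str.join "\n" s).toList) := by
    rw [PySem.Str.toList_join, PySem.Str.toList_join]
    rcases s with _ | ⟨a, t⟩
    · simp only [List.map_cons, List.map_nil, PySem.Chars.join_singleton,
        PySem.Chars.join_nil, hrl]
      try rfl
    · simp only [List.map_cons]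
      rw [PySem.Chars.join_cons_cons]
      apply strip_ws_prefix
      intro c hc
      rcases List.mem_append.mp hc with h1 | h1
      · exact hw c h1
      · exact hnl c h1
  simp only [pvContent, PySem.Str.strip]
  exact congrArg String.ofList key

lemma pvMsgs_blank_head (role : String) (r : String) (hr : PySem.Str.strip r = "")
    (s : List String) (ss : List (List String)) :
    pvMsgs role ((r :: s) :: ss) = pvMsgs role (s :: ss) := by
  simp [pvMsgs, pvContent_blank_cons r hr]

-- A's loop computes the alternating-role messages of the segments of (mc ++ rest)
lemma pvA_loop_eq (rest : List String) (role : String) (mc : List String)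
    (msgs : List (List (String × String))) :
    pvA_loop rest role mc msgs =
      msgs ++ pvMsgs role ((mc ++ (pvSegs rest).1) :: (pvSegs rest).2) := by
  induction rest, role, mc, msgs using pvA_loop.induct with
  | case1 role mc msgs => simp [pvA_loop, pvSegs, pvA_flush_eq, pvMsgs]
  | case2 line role mc msgs hsep msgs' role' r rest' hr ih =>
    replace ih : pvA_loop rest' (if role = "user" then "assistant" else "user") []
        (pvA_flush role mc msgs) =
        pvA_flush role mc msgs ++
          pvMsgs (if role = "user" then "assistant" else "user")
            (([] ++ (pvSegs rest').1) :: (pvSegs rest').2) := ih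
    rw [pvA_loop]
    simp only [if_pos hsep, hr, if_true]
    rw [ih]
    simp [pvSegs, hsep, hr, pvMsgs, pvA_flush_eq, pvToggle, pvContent_blank_cons r hr]
  | case3 line role mc msgs hsep msgs' role' r rest' hr ih =>
    replace ih : pvA_loop (r :: rest') (if role = "user" then "assistant" else "user") []
        (pvA_flush role mc msgs) =
        pvA_flush role mc msgs ++
          pvMsgs (if role = "user" then "assistant" else "user")
            (([] ++ (pvSegs (r :: rest')).1) :: (pvSegs (r :: rest')).2) := ih
    rw [pvA_loop]
    simp only [if_pos hsep, if_neg hr]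
    rw [ih]
    simp [pvSegs, hsep, pvMsgs, pvA_flush_eq, pvToggle]
  | case4 line role mc msgs hsep msgs' role' ih =>
    replace ih : pvA_loop [] (if role = "user" then "assistant" else "user") []
        (pvA_flush role mc msgs) =
        pvA_flush role mc msgs ++
          pvMsgs (if role = "user" then "assistant" else "user")
            (([] ++ (pvSegs []).1) :: (pvSegs []).2) := ih
    have hce : pvContent [] = "" := by decide
    rw [pvA_loop]
    simp only [if_pos hsep]
    rw [ih]
    simp [pvSegs, hsep, pvMsgs, pvA_flush_eq, pvToggle, hce]
  | case5 line rest role mc msgs hsep ih =>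
    rw [pvA_loop]
    simp only [if_neg hsep]
    rw [ih]
    simp [pvSegs, hsep]

-- B's segment fold computes pvSegs
lemma pvB_segments_fold (rest : List String) : ∀ (sacc : List (List String)) (cur : List String),
    (rest.foldl
      (fun (acc : List (List String) × List String) line =>
        if PySem.Str.strip line = "---" then (acc.1 ++ [acc.2], [])
        else (acc.1, acc.2 ++ [line])) (sacc, cur)).1 ++
    [(rest.foldl
      (fun (acc : List (List String) × List String) line =>
        if PySem.Str.strip line = "---" then (acc.1 ++ [acc.2], [])
        else (acc.1, acc.2 ++ [line])) (sacc, cur)).2] =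
    sacc ++ (cur ++ (pvSegs rest).1) :: (pvSegs rest).2 := by
  induction rest with
  | nil => intro sacc cur; simp [pvSegs]
  | cons line rest ih =>
    intro sacc cur
    simp only [List.foldl_cons]
    by_cases h : PySem.Str.strip line = "---"
    · simp only [if_pos h, ih]
      simp [pvSegs, if_pos h]
    · simp only [if_neg h, ih]
      simp [pvSegs, if_neg h]

lemma pvB_segments_eq (rest : List String) :
    pvB_segments rest = (pvSegs rest).1 :: (pvSegs rest).2 := by
  simpa [pvB_segments] using pvB_segments_fold rest [] []

def pvRoleOf (n : Int) : String := if PySem.Int.mod n 2 == 0 then "user" else "assistant"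

lemma pvToggle_roleOf (n : Int) : pvToggle (pvRoleOf n) = pvRoleOf (n + 1) := by
  simp only [pvRoleOf, PySem.Int.mod_eq_emod_of_pos (by omega : (0:Int) < 2)]
  rcases Int.emod_two_eq n with h | h <;>
    simp [pvToggle, show (n+1) % 2 = (n % 2 + 1) % 2 from by omega, h]

lemma pvB_messages_fold (segs : List (List String)) : ∀ (n : Int)
    (msgs : List (List (String × String))),
    (PySem.List.enumerate segs n).foldl
      (fun msgs iseg =>
        let content := PySem.Str.strip (PySem.Str.join "\n" iseg.2)
        if content = "" then msgs
        else msgs ++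
          [[("role", if PySem.Int.mod iseg.1 2 == 0 then "user" else "assistant"),
            ("content", content)]]) msgs
    = msgs ++ pvMsgs (pvRoleOf n) segs := by
  induction segs with
  | nil => intro n msgs; simp [PySem.List.enumerate, pvMsgs]
  | cons s ss ih =>
    intro n msgs
    simp only [PySem.List.enumerate, List.foldl_cons]
    rw [ih (n + 1)]
    simp only [pvMsgs, ← pvToggle_roleOf n]
    by_cases h : PySem.Str.strip (PySem.Str.join "\n" s) = "" <;>
      simp [h, pvContent, pvRoleOf]

lemma pvB_messages_eq (segs : List (List String)) :
    pvB_messages segs = pvMsgs "user" segs := by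
  have := pvB_messages_fold segs 0 []
  simpa [pvB_messages, pvRoleOf] using this

lemma pvMain (rest : List String) :
    pvA_loop rest "user" [] [] = pvB_messages (pvB_segments rest) := by
  rw [pvA_loop_eq, pvB_segments_eq, pvB_messages_eq]
  simp

-- ===== VERDICT (by name: the statement is the Claim_ definition above) =====
theorem parse_buffer_content_spec : Claim_equal_parse_buffer_content := by
  intro lines _
  unfold Spec_parse_buffer_content
  rcases lines with _ | ⟨l0, rest0⟩
  · simp only [parse_buffer_content, parse_buffer_content_alt, pvMain]
  · rcases rest0 with _ | ⟨r, rest1⟩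
    · by_cases hm : PySem.Str.startswith l0 "MODEL: " = true
      · simp only [parse_buffer_content, parse_buffer_content_alt, if_pos hm, pvMain]
      · simp only [parse_buffer_content, parse_buffer_content_alt, if_neg hm, pvMain]
    · by_cases hm : PySem.Str.startswith l0 "MODEL: " = true
      · by_cases hb : PySem.Str.strip r = ""
        · have hseg : pvSegs (r :: rest1) = (r :: (pvSegs rest1).1, (pvSegs rest1).2) := by
            have hr3 : ¬ PySem.Str.strip r = "---" := by simp [hb]
            simp [pvSegs, hr3]
          simp only [parse_buffer_content, parse_buffer_content_alt, if_pos hm, if_pos hb]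
          rw [pvMain rest1, pvB_segments_eq rest1, pvB_segments_eq (r :: rest1),
            pvB_messages_eq, pvB_messages_eq, hseg, pvMsgs_blank_head "user" r hb]
        · simp only [parse_buffer_content, parse_buffer_content_alt, if_pos hm, if_neg hb, pvMain]
      · simp only [parse_buffer_content, parse_buffer_content_alt, if_neg hm, pvMain]
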